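-- pv_equiv track=rewrite | github.com/pangpang-study/algorithm-coding-test-study | nyc/211109/baekjoon_1105_팔.py | solution
-- ===== SOURCE A (Python) =====
-- def solution(left, right):
--     count = 0
--     if len(left) != len(right):
--         return count
--
--     for i in range(len(left)):
--         if left[i] == right[i]:
--             if left[i] == '8':
--                 count += 1
--         else:
--             break
--     return count
-- ===== SOURCE B (Python) =====
-- def solution(left, right):
--     if len(left) != len(right):
--         return 0
--     return sum(1 for i in range(len(left))
--                if left[i] == '8' and left[:i + 1] == right[:i + 1])
-- ===== Notes on version B (the rewrite author's own statement) =====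
-- stated objective: alternative
-- what changed: Instead of A's fused scan that accumulates a count and breaks at the first mismatch, B counts every position i with left[i]=='8' whose whole prefixes left[:i+1] and right[:i+1] are equal (positionwise prefix-equality test, no break, no running scan state).
import Mathlib
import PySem

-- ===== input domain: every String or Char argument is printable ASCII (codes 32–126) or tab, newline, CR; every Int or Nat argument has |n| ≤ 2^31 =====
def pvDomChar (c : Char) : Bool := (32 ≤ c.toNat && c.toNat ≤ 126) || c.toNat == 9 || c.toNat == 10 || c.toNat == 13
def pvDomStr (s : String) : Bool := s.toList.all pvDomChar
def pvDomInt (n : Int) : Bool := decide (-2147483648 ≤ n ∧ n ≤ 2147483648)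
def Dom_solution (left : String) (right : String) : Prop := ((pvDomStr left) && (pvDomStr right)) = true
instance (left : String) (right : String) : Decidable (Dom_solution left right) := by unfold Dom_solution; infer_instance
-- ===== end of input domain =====

-- B replaces A's fused scan-and-break loop by a positionwise test: it counts the
-- positions i with left[i]=='8' whose whole prefixes left[:i+1] and right[:i+1] agree.
-- ===== PORT A =====
-- the for-loop of A with its running count and break, as structural recursion over both strings
def solutionLoop : List Char → List Char → Int → Int
  | a :: as, b :: bs, count =>
      if a = b then solutionLoop as bs (if a = '8' then count + 1 else count)
      else count
  | _, _, count => count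

def solution (left : String) (right : String) : Int :=
  let count : Int := 0
  if left.toList.length ≠ right.toList.length then count
  else solutionLoop left.toList right.toList count

-- ===== PORT B =====
-- sum(1 for i in range(len(left)) if left[i] == '8' and left[:i+1] == right[:i+1])
def solution_alt (left : String) (right : String) : Int :=
  if left.toList.length ≠ right.toList.length then 0
  else
    (List.range left.toList.length).foldl
      (fun acc i =>
        if left.toList.getD i ' ' = '8' ∧ left.toList.take (i + 1) = right.toList.take (i + 1)
        then acc + 1 else acc)
      0

-- ===== PRECONDITION & SPEC =====
def Spec_solution (left : String) (right : String) (out : Int) : Prop := out = solution_alt left right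
instance (left : String) (right : String) (out : Int) : Decidable (Spec_solution left right out) := by unfold Spec_solution; infer_instance

-- ===== CLAIM (what is proved, stated in full; the proofs are below) =====
def Claim_equal_solution : Prop := ∀ (left : String) (right : String), Dom_solution left right → Spec_solution left right (solution left right)

-- ===== LEMMAS AND PROOFS =====
-- index of the first mismatch between two lists (= length of the longest common prefix)
def firstMismatch : List Char → List Char → Nat
  | a :: as, b :: bs => if a ≠ b then 0 else firstMismatch as bs + 1
  | _, _ => 0

theorem firstMismatch_le (l r : List Char) : firstMismatch l r ≤ l.length := by
  induction l generalizing r with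
  | nil => simp [firstMismatch]
  | cons a as ih =>
    cases r with
    | nil => simp [firstMismatch]
    | cons b bs =>
      by_cases hab : a = b
      · simpa [firstMismatch, hab] using ih bs
      · simp [firstMismatch, hab]

theorem solutionLoop_eq (l r : List Char) (c : Int) :
    solutionLoop l r c = c + ((l.take (firstMismatch l r)).count '8' : Int) := by
  induction l generalizing r c with
  | nil => simp [solutionLoop, firstMismatch]
  | cons a as ih =>
    cases r with
    | nil => simp [solutionLoop, firstMismatch]
    | cons b bs =>
      by_cases h : a = b
      · subst h
        by_cases h8 : a = '8' <;>
          simp [solutionLoop, firstMismatch, h8, ih, List.count_cons] <;> omega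
      · simp [solutionLoop, firstMismatch, h]

theorem take_eq_iff (l r : List Char) (hlen : l.length = r.length) (k : Nat) :
    l.take k = r.take k ↔ min k l.length ≤ firstMismatch l r := by
  induction l generalizing r k with
  | nil =>
    cases r with
    | nil => simp [firstMismatch]
    | cons b bs => simp at hlen
  | cons a as ih =>
    cases r with
    | nil => simp at hlen
    | cons b bs =>
      cases k with
      | zero => simp
      | succ k =>
        by_cases h : a = b
        · subst h
          have := ih bs (by simpa using hlen) k
          simp [firstMismatch, this, Nat.succ_min_succ]
        · simp [firstMismatch, h, Nat.succ_min_succ]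

theorem foldl_if_count (p : Nat → Prop) [DecidablePred p] (L : List Nat) (acc : Int) :
    L.foldl (fun a i => if p i then a + 1 else a) acc
      = acc + (L.countP (fun i => decide (p i)) : Int) := by
  induction L generalizing acc with
  | nil => simp
  | cons x xs ih =>
    by_cases h : p x <;> simp [List.countP_cons, h, ih] <;> omega

theorem count_take_eq_countP_range (l : List Char) (m : Nat) (hm : m ≤ l.length) :
    (l.take m).count '8'
      = (List.range m).countP (fun i => decide (l.getD i ' ' = '8')) := by
  induction m with
  | zero => simp
  | succ m ih =>
    have hm' : m < l.length := hm
    have hg : l[m]? = some (l.getD m ' ') := by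
      simp [List.getD, List.getElem?_eq_getElem hm']
    have ht : l.take (m + 1) = l.take m ++ [l.getD m ' '] := by
      rw [List.take_add_one, hg]; rfl
    rw [ht, List.range_succ, List.count_append, List.countP_append,
      ih (Nat.le_of_lt hm')]
    by_cases h8 : l.getD m ' ' = '8' <;> simp [h8, List.count_singleton]

theorem countP_range_lt (q : Nat → Prop) [DecidablePred q] (m n : Nat) (hmn : m ≤ n) :
    (List.range n).countP (fun i => decide (q i ∧ i < m))
      = (List.range m).countP (fun i => decide (q i)) := by
  obtain ⟨d, rfl⟩ := Nat.exists_eq_add_of_le hmn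
  rw [List.range_add, List.countP_append]
  have h2 : ((List.range d).map (m + ·)).countP (fun i => decide (q i ∧ i < m)) = 0 := by
    rw [List.countP_eq_zero]
    intro x hx
    simp only [List.mem_map, List.mem_range] at hx
    obtain ⟨y, _, rfl⟩ := hx
    simp
  have h1 : (List.range m).countP (fun i => decide (q i ∧ i < m))
      = (List.range m).countP (fun i => decide (q i)) := by
    apply List.countP_congr
    intro x hx
    simp only [List.mem_range] at hx
    simp [hx]
  omega

-- ===== VERDICT (by name: the statement is the Claim_ definition above) =====
theorem solution_spec : Claim_equal_solution := by
  intro left right _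
  unfold Spec_solution solution solution_alt
  split_ifs with h
  · rfl
  · push_neg at h
    set l := left.toList with hl
    set r := right.toList with hr
    rw [solutionLoop_eq, foldl_if_count]
    have hfm : firstMismatch l r ≤ l.length := firstMismatch_le l r
    have hcongr : (List.range l.length).countP
        (fun i => decide (l.getD i ' ' = '8' ∧ l.take (i + 1) = r.take (i + 1)))
        = (List.range l.length).countP
        (fun i => decide (l.getD i ' ' = '8' ∧ i < firstMismatch l r)) := by
      apply List.countP_congr
      intro i hi
      simp only [List.mem_range] at hi
      have := take_eq_iff l r h (i + 1)
      have hmin : min (i + 1) l.length = i + 1 := by omega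
      rw [hmin] at this
      simp [this]
    rw [hcongr, countP_range_lt _ _ _ hfm,
      ← count_take_eq_countP_range l (firstMismatch l r) hfm]
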